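-- pv_equiv track=rewrite | github.com/yudai-patronai/problembook | problems/subarrays/rmq_with_updates/test_generator.py | solve
-- ===== SOURCE A (Python) =====
-- def solve(n, m, a, b):
--     ans = []
--     a = a[:]
--     for cmd, x, y in b:
--         if cmd == "upd":
--             a[x] = y
--         else:
--             cur = float("-inf")
--             for i in range(x, y+1):
--                 cur = max(cur, a[i])
--             ans.append(str(cur))
--     return " ".join(ans)
-- ===== SOURCE B (Python) =====
-- # Segment tree for range-max with point updates: a different algorithm (tree descent per command instead of A's per-query scan of the array).
-- NEG = float("-inf")
--
--
-- def _build(arr, lo, hi):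
--     # tree node = (size, max, left, right); leaf = (1, v, None, None)
--     if hi - lo == 1:
--         return (1, arr[lo], None, None)
--     mid = (lo + hi) // 2
--     l = _build(arr, lo, mid)
--     r = _build(arr, mid, hi)
--     return (hi - lo, max(l[1], r[1]), l, r)
--
--
-- def _update(t, pos, val):
--     size, _, l, r = t
--     if size == 1:
--         return (1, val, None, None)
--     ls = l[0]
--     if pos < ls:
--         l = _update(l, pos, val)
--     else:
--         r = _update(r, pos - ls, val)
--     return (size, max(l[1], r[1]), l, r)
--
--
-- def _query(t, lo, hi):
--     # max over positions [lo, hi) of t; NEG if the intersection is empty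
--     size, mx, l, r = t
--     if lo <= 0 and size <= hi:
--         return mx
--     if hi <= 0 or size <= lo:
--         return NEG
--     ls = l[0]
--     return max(_query(l, lo, hi), _query(r, lo - ls, hi - ls))
--
--
-- def solve(n, m, a, b):
--     t = _build(a, 0, len(a)) if a else None
--     out = []
--     for cmd, x, y in b:
--         if cmd == "upd":
--             t = _update(t, x, y)
--         else:
--             out.append(str(_query(t, x, y + 1) if t is not None else NEG))
--     return " ".join(out)
-- ===== Notes on version B (the rewrite author's own statement) =====
-- stated objective: alternative
-- what changed: Replaces A's per-query linear scan of the maintained array with a recursive segment tree (build once, then point updates and range-max queries descend the tree).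
-- outside the precondition, e.g. on solve(3, 2, [1, 2, 9], [('upd', -1, 0), ('qry', 0, 2)]): A returns '2', B returns '9'
import Mathlib
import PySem

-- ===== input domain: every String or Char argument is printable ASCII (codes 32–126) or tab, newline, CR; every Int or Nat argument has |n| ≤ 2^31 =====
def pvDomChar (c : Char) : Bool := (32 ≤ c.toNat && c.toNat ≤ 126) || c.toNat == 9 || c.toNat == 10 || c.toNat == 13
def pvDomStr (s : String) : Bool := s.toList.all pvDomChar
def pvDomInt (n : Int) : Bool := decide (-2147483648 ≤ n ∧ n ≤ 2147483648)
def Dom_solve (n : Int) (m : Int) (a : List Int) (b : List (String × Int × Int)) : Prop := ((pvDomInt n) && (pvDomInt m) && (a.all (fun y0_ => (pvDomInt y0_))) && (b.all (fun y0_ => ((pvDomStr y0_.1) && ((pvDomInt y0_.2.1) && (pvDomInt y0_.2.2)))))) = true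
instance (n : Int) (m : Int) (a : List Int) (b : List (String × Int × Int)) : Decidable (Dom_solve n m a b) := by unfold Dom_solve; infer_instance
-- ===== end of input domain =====

-- B replaces A's per-query linear scan with a recursive segment tree (objective: alternative).
-- Python's float("-inf") running maximum is modelled as `Option Int` (none = -inf); str(float("-inf")) = "-inf".

-- ===== PORT A =====
-- cur = max(cur, v) where cur starts as float("-inf")
def pvOmax (c : Option Int) (v : Int) : Option Int :=
  match c with
  | none => some v
  | some c => some (max c v)

-- str(cur)
def pvOstr : Option Int → String
  | none => "-inf"
  | some v => PySem.Int.toStr v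

-- the body of A's `for cmd, x, y in b` loop (state: the mutable copy of a and the ans list)
def stepA (st : List Int × List String) (q : String × Int × Int) : List Int × List String :=
  if q.1 == "upd" then
    -- a[x] = y  (total form; Pre_ keeps the index in range)
    (PySem.List.pySetD st.1 q.2.1 q.2.2, st.2)
  else
    -- cur = -inf; for i in range(x, y+1): cur = max(cur, a[i])   (pyGetD total; Pre_ keeps i in range)
    (st.1, st.2 ++ [pvOstr ((PySem.List.pyRange q.2.1 (q.2.2 + 1) 1).foldl
      (fun c i => pvOmax c (PySem.List.pyGetD st.1 i 0)) none)])

def solve (n : Int) (m : Int) (a : List Int) (b : List (String × Int × Int)) : String :=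
  PySem.Str.join " " ((b.foldl stepA (a, [])).2)

-- ===== PORT B =====
-- Source B's tuple (size, mx, left, right); leaf = (1, v, None, None)
inductive STree where
  | leaf : Int → STree
  | node : Int → Int → STree → STree → STree
deriving DecidableEq, Repr

def stSize : STree → Int
  | .leaf _ => 1
  | .node s _ _ _ => s

def stMax : STree → Int
  | .leaf v => v
  | .node _ m _ _ => m

-- _build(arr, lo, hi); Python tests `hi - lo == 1`: the `≤ 1` branch and the structural fuel
-- (hi - lo).toNat, which bounds the recursion depth, are only totality guards — on the calls
-- Source B makes (lo < hi) the fuel is never exhausted and the same recursion is performed.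
def stBuildF : Nat → List Int → Int → Int → STree
  | 0, arr, lo, _ => STree.leaf (PySem.List.pyGetD arr lo 0)
  | k + 1, arr, lo, hi =>
    if hi - lo ≤ 1 then STree.leaf (PySem.List.pyGetD arr lo 0)
    else
      let mid := PySem.Int.floordiv (lo + hi) 2
      let l := stBuildF k arr lo mid
      let r := stBuildF k arr mid hi
      STree.node (hi - lo) (max (stMax l) (stMax r)) l r

def stBuild (arr : List Int) (lo hi : Int) : STree := stBuildF (hi - lo).toNat arr lo hi

-- _update(t, pos, val)
def stUpdate : STree → Int → Int → STree
  | STree.leaf _, _, val => STree.leaf val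
  | STree.node s _ l r, pos, val =>
    if pos < stSize l then
      let l' := stUpdate l pos val
      STree.node s (max (stMax l') (stMax r)) l' r
    else
      let r' := stUpdate r (pos - stSize l) val
      STree.node s (max (stMax l) (stMax r')) l r'

-- max of two possibly -inf values
def pvOmax2 : Option Int → Option Int → Option Int
  | none, o => o
  | some x, none => some x
  | some x, some y => some (max x y)

-- _query(t, lo, hi); on a leaf the third Python branch is unreachable (a leaf has size 1:
-- no integers satisfy ¬(lo ≤ 0 ∧ 1 ≤ hi) ∧ ¬(hi ≤ 0 ∨ 1 ≤ lo)), so the final `none` is dead code.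
def stQuery : STree → Int → Int → Option Int
  | STree.leaf v, lo, hi =>
    if lo ≤ 0 ∧ 1 ≤ hi then some v
    else none
  | STree.node s mx l r, lo, hi =>
    if lo ≤ 0 ∧ s ≤ hi then some mx
    else if hi ≤ 0 ∨ s ≤ lo then none
    else pvOmax2 (stQuery l lo hi) (stQuery r (lo - stSize l) (hi - stSize l))

-- the body of Source B's loop (state: the optional tree and the out list); an "upd" with t = None
-- raises in Python (outside Pre_), Option.map is the total form.
def stepB (st : Option STree × List String) (q : String × Int × Int) : Option STree × List String :=
  if q.1 == "upd" then
    (st.1.map (fun t => stUpdate t q.2.1 q.2.2), st.2)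
  else
    (st.1, st.2 ++ [pvOstr (match st.1 with
      | none => (none : Option Int)
      | some t => stQuery t q.2.1 (q.2.2 + 1))])

def solve_alt (n : Int) (m : Int) (a : List Int) (b : List (String × Int × Int)) : String :=
  PySem.Str.join " "
    ((b.foldl stepB
      ((if a.isEmpty then none else some (stBuild a 0 (PySem.List.len a))), [])).2)

-- ===== PRECONDITION & SPEC =====
-- Pre_ excludes commands whose position is out of range (A raises IndexError there) and commands
-- that name an element through a negative position (Python's negative-index wraparound, a corner
-- no 0-based RMQ spec fixes; B's tree does the natural 0-based thing there). Queries with x > y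
-- stay inside Pre_ whatever x, y are: A scans nothing and answers "-inf", as does B.
def Pre_solve (n : Int) (m : Int) (a : List Int) (b : List (String × Int × Int)) : Prop :=
  ∀ q ∈ b, (q.1 = "upd" → 0 ≤ q.2.1 ∧ q.2.1 < (a.length : Int)) ∧
           (q.1 ≠ "upd" → q.2.2 < q.2.1 ∨ (0 ≤ q.2.1 ∧ q.2.2 < (a.length : Int)))
instance (n : Int) (m : Int) (a : List Int) (b : List (String × Int × Int)) : Decidable (Pre_solve n m a b) := by unfold Pre_solve; infer_instance

def pvWitness_solve : Int × Int × List Int × (List (String × Int × Int)) :=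
  (4, 3, [1, 5, 2, 4], [("qry", 0, 3), ("upd", 2, 7), ("qry", 1, 2)])

def Spec_solve (n : Int) (m : Int) (a : List Int) (b : List (String × Int × Int)) (out : String) : Prop := out = solve_alt n m a b
instance (n : Int) (m : Int) (a : List Int) (b : List (String × Int × Int)) (out : String) : Decidable (Spec_solve n m a b out) := by unfold Spec_solve; infer_instance

-- ===== CLAIM (what is proved, stated in full; the proofs are below) =====
def Claim_equal_solve : Prop := ∀ (n : Int) (m : Int) (a : List Int) (b : List (String × Int × Int)), Dom_solve n m a b → Pre_solve n m a b → Spec_solve n m a b (solve n m a b)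

-- ===== LEMMAS AND PROOFS =====

-- the list of values a tree represents
def toListT : STree → List Int
  | .leaf v => [v]
  | .node _ _ l r => toListT l ++ toListT r

-- maximum of a list as A computes it (none = -inf)
def lMax (xs : List Int) : Option Int := xs.foldl pvOmax none

-- well-formedness: cached sizes and maxima are consistent
def stWF : STree → Prop
  | .leaf _ => True
  | .node s mx l r => stWF l ∧ stWF r ∧ s = stSize l + stSize r ∧ mx = max (stMax l) (stMax r)

-- the window of xs at Int positions [lo, hi)
def segI (xs : List Int) (lo hi : Int) : List Int :=
  (xs.drop lo.toNat).take (hi - max lo 0).toNat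

lemma pvOmax_eq (o : Option Int) (v : Int) : pvOmax o v = pvOmax2 o (some v) := by
  cases o <;> rfl

lemma pvOmax2_assoc (a b c : Option Int) : pvOmax2 (pvOmax2 a b) c = pvOmax2 a (pvOmax2 b c) := by
  cases a <;> cases b <;> cases c <;> simp [pvOmax2, max_assoc]

lemma foldl_pvOmax_acc (xs : List Int) : ∀ (o : Option Int),
    xs.foldl pvOmax o = pvOmax2 o (xs.foldl pvOmax none) := by
  induction xs with
  | nil => intro o; cases o <;> rfl
  | cons x xs ih =>
    intro o
    simp only [List.foldl_cons]
    have hnone : pvOmax2 none (some x) = some x := rfl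
    rw [ih (pvOmax o x), ih (pvOmax none x), pvOmax_eq o x, pvOmax_eq none x, hnone,
      pvOmax2_assoc]

lemma lMax_cons (x : Int) (l : List Int) : lMax (x :: l) = pvOmax2 (some x) (lMax l) := by
  unfold lMax
  rw [List.foldl_cons, foldl_pvOmax_acc]
  rfl

lemma lMax_append (xs ys : List Int) : lMax (xs ++ ys) = pvOmax2 (lMax xs) (lMax ys) := by
  unfold lMax
  rw [List.foldl_append]
  exact foldl_pvOmax_acc ys (xs.foldl pvOmax none)

lemma wf_size : ∀ (t : STree), stWF t → stSize t = ((toListT t).length : Int) := by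
  intro t
  induction t with
  | leaf v => intro _; simp [stSize, toListT]
  | node s mx l r ihl ihr =>
    intro h
    obtain ⟨hl, hr, hs, _⟩ := h
    simp only [stSize, toListT, List.length_append]
    rw [hs, ihl hl, ihr hr]
    push_cast
    ring

lemma wf_max : ∀ (t : STree), stWF t → lMax (toListT t) = some (stMax t) := by
  intro t
  induction t with
  | leaf v => intro _; rfl
  | node s mx l r ihl ihr =>
    intro h
    obtain ⟨hl, hr, _, hmx⟩ := h
    show lMax (toListT l ++ toListT r) = some mx
    rw [lMax_append, ihl hl, ihr hr, hmx]
    rfl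

lemma segI_cons (x : Int) (xs : List Int) (lo hi : Int) :
    segI (x :: xs) lo hi =
      (if lo ≤ 0 ∧ 1 ≤ hi then [x] else []) ++ segI xs (lo - 1) (hi - 1) := by
  unfold segI
  by_cases hlo : lo ≤ 0
  · have h0 : lo.toNat = 0 := by omega
    have h0' : (lo - 1).toNat = 0 := by omega
    have hm : max lo 0 = 0 := by omega
    have hm' : max (lo - 1) 0 = 0 := by omega
    by_cases hhi : 1 ≤ hi
    · have hc : (hi - (0:Int)).toNat = (hi - 1 - 0).toNat + 1 := by omega
      rw [h0, h0', hm, hm', List.drop_zero, List.drop_zero, if_pos ⟨hlo, hhi⟩, hc,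
        List.take_succ_cons, List.singleton_append]
    · have h1 : (hi - (0:Int)).toNat = 0 := by omega
      have h2 : (hi - 1 - (0:Int)).toNat = 0 := by omega
      rw [h0, h0', hm, hm', h1, h2, if_neg (by omega), List.take_zero, List.take_zero,
        List.nil_append]
  · have h0 : lo.toNat = (lo - 1).toNat + 1 := by omega
    have hm : max lo 0 = lo := by omega
    have hm' : max (lo - 1) 0 = lo - 1 := by omega
    have harg : hi - 1 - (lo - 1) = hi - lo := by ring
    rw [h0, hm, hm', harg, List.drop_succ_cons, if_neg (by omega), List.nil_append]

lemma segI_append : ∀ (xl xr : List Int) (lo hi : Int),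
    segI (xl ++ xr) lo hi =
      segI xl lo hi ++ segI xr (lo - xl.length) (hi - xl.length) := by
  intro xl
  induction xl with
  | nil =>
    intro xr lo hi
    simp [segI]
  | cons x xl ih =>
    intro xr lo hi
    have e1 : lo - (((x :: xl).length : Nat) : Int) = lo - 1 - (xl.length : Int) := by
      simp only [List.length_cons]; push_cast; ring
    have e2 : hi - (((x :: xl).length : Nat) : Int) = hi - 1 - (xl.length : Int) := by
      simp only [List.length_cons]; push_cast; ring
    rw [List.cons_append, segI_cons, ih, e1, e2, segI_cons, List.append_assoc]

lemma stBuild_spec : ∀ (k : Nat) (arr : List Int) (lo hi : Int), (hi - lo).toNat ≤ k →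
    0 ≤ lo → lo < hi → hi ≤ (arr.length : Int) →
    stWF (stBuildF k arr lo hi) ∧
      toListT (stBuildF k arr lo hi) = (arr.drop lo.toNat).take (hi - lo).toNat := by
  intro k
  induction k with
  | zero => intro arr lo hi hk h0 hlt hle; omega
  | succ k ih =>
    intro arr lo hi hk h0 hlt hle
    rw [stBuildF]
    by_cases h1 : hi - lo ≤ 1
    · rw [if_pos h1]
      have hidx : lo.toNat < arr.length := by omega
      have hget : PySem.List.pyGetD arr lo 0 = arr[lo.toNat] :=
        PySem.List.pyGetD_eq_getElem arr 0 h0 (by omega)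
      constructor
      · trivial
      · have hone : (hi - lo).toNat = 1 := by omega
        rw [hone, List.drop_eq_getElem_cons hidx, List.take_succ_cons, List.take_zero]
        show [PySem.List.pyGetD arr lo 0] = [arr[lo.toNat]]
        rw [hget]
    · rw [if_neg h1]
      dsimp only
      have hmide : PySem.Int.floordiv (lo + hi) 2 = (lo + hi) / 2 :=
        PySem.Int.floordiv_eq_ediv_of_pos (by norm_num)
      set mid := PySem.Int.floordiv (lo + hi) 2 with hmiddef
      have hb1 : lo < mid := by omega
      have hb2 : mid < hi := by omega
      obtain ⟨wl, tl⟩ := ih arr lo mid (by omega) h0 hb1 (by omega)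
      obtain ⟨wr, tr⟩ := ih arr mid hi (by omega) (by omega) hb2 hle
      have lll : ((toListT (stBuildF k arr lo mid)).length : Int) = mid - lo := by
        rw [tl]
        simp only [List.length_take, List.length_drop]
        omega
      have llr : ((toListT (stBuildF k arr mid hi)).length : Int) = hi - mid := by
        rw [tr]
        simp only [List.length_take, List.length_drop]
        omega
      refine ⟨⟨wl, wr, ?_, rfl⟩, ?_⟩
      · rw [wf_size _ wl, wf_size _ wr, lll, llr]
        ring
      · show toListT (stBuildF k arr lo mid) ++ toListT (stBuildF k arr mid hi) = _
        rw [tl, tr]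
        have hsplit : (hi - lo).toNat = (mid - lo).toNat + (hi - mid).toNat := by omega
        rw [hsplit, List.take_add]
        have hdd : (List.drop lo.toNat arr).drop (mid - lo).toNat = List.drop mid.toNat arr := by
          rw [List.drop_drop]
          congr 1
          omega
        rw [hdd]

lemma stUpdate_spec : ∀ (t : STree), stWF t → ∀ (p v : Int), 0 ≤ p →
    p < ((toListT t).length : Int) →
    stWF (stUpdate t p v) ∧ toListT (stUpdate t p v) = (toListT t).set p.toNat v := by
  intro t
  induction t with
  | leaf w =>
    intro _ p v h0 hlt
    have hp : p = 0 := by simp [toListT] at hlt; omega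
    subst hp
    exact ⟨trivial, rfl⟩
  | node s mx l r ihl ihr =>
    intro h p v h0 hlt
    obtain ⟨hl, hr, hs, hmx⟩ := h
    have hls : stSize l = ((toListT l).length : Int) := wf_size l hl
    have hlt' : p < ((toListT l).length : Int) + ((toListT r).length : Int) := by
      simp only [toListT, List.length_append] at hlt
      push_cast at hlt
      omega
    rw [stUpdate]
    by_cases hp : p < stSize l
    · rw [if_pos hp]
      dsimp only
      obtain ⟨wl', tl'⟩ := ihl hl p v h0 (by omega)
      have hsz' : stSize (stUpdate l p v) = stSize l := by
        rw [wf_size _ wl', tl', List.length_set, hls]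
      refine ⟨⟨wl', hr, by rw [hsz']; exact hs, rfl⟩, ?_⟩
      show toListT (stUpdate l p v) ++ toListT r = (toListT l ++ toListT r).set p.toNat v
      rw [tl', List.set_append, if_pos (by omega)]
    · rw [if_neg hp]
      dsimp only
      obtain ⟨wr', tr'⟩ := ihr hr (p - stSize l) v (by omega) (by omega)
      have hsz' : stSize (stUpdate r (p - stSize l) v) = stSize r := by
        rw [wf_size _ wr', tr', List.length_set, wf_size r hr]
      refine ⟨⟨hl, wr', by rw [hsz']; exact hs, rfl⟩, ?_⟩
      show toListT l ++ toListT (stUpdate r (p - stSize l) v)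
          = (toListT l ++ toListT r).set p.toNat v
      rw [tr', List.set_append, if_neg (by omega)]
      have e : (p - stSize l).toNat = p.toNat - (toListT l).length := by omega
      rw [e]

lemma stQuery_spec : ∀ (t : STree), stWF t → ∀ (lo hi : Int),
    stQuery t lo hi = lMax (segI (toListT t) lo hi) := by
  intro t
  induction t with
  | leaf v =>
    intro _ lo hi
    show (if lo ≤ 0 ∧ 1 ≤ hi then some v else none) = lMax (segI [v] lo hi)
    by_cases hc : lo ≤ 0 ∧ 1 ≤ hi
    · rw [if_pos hc]
      have hseg : segI [v] lo hi = [v] := by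
        unfold segI
        have h0 : lo.toNat = 0 := by omega
        have hm : max lo 0 = 0 := by omega
        rw [h0, hm, List.drop_zero]
        exact List.take_of_length_le (by simp; omega)
      rw [hseg]
      rfl
    · rw [if_neg hc]
      have hseg : segI [v] lo hi = [] := by
        unfold segI
        rcases (by omega : hi ≤ 0 ∨ 1 ≤ lo) with h | h
        · have h1 : (hi - max lo 0).toNat = 0 := by omega
          rw [h1, List.take_zero]
        · have h1 : (1:Nat) ≤ lo.toNat := by omega
          rw [List.drop_eq_nil_of_le (by simp; omega), List.take_nil]
      rw [hseg]
      rfl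
  | node s mx l r ihl ihr =>
    intro h lo hi
    obtain ⟨hl, hr, hs, hmx⟩ := h
    have hsz : s = (((toListT l ++ toListT r).length : Nat) : Int) := by
      rw [hs, wf_size l hl, wf_size r hr]
      simp only [List.length_append]
      push_cast
      ring
    show (if lo ≤ 0 ∧ s ≤ hi then some mx
      else if hi ≤ 0 ∨ s ≤ lo then none
      else pvOmax2 (stQuery l lo hi) (stQuery r (lo - stSize l) (hi - stSize l)))
        = lMax (segI (toListT l ++ toListT r) lo hi)
    by_cases hfull : lo ≤ 0 ∧ s ≤ hi
    · rw [if_pos hfull]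
      have hseg : segI (toListT l ++ toListT r) lo hi = toListT l ++ toListT r := by
        unfold segI
        have h0 : lo.toNat = 0 := by omega
        have hm : max lo 0 = 0 := by omega
        rw [h0, hm, List.drop_zero]
        exact List.take_of_length_le (by omega)
      rw [hseg, lMax_append, wf_max l hl, wf_max r hr, hmx]
      rfl
    · rw [if_neg hfull]
      by_cases hemp : hi ≤ 0 ∨ s ≤ lo
      · rw [if_pos hemp]
        have hseg : segI (toListT l ++ toListT r) lo hi = [] := by
          unfold segI
          rcases hemp with h | h
          · have h1 : (hi - max lo 0).toNat = 0 := by omega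
            rw [h1, List.take_zero]
          · rw [List.drop_eq_nil_of_le (by omega), List.take_nil]
        rw [hseg]
        rfl
      · rw [if_neg hemp]
        rw [ihl hl, ihr hr, segI_append, lMax_append, wf_size l hl]

lemma foldl_pvOmaxd_acc (xs : List Int) : ∀ (ys : List Int) (o : Option Int),
    ys.foldl (fun c i => pvOmax c (PySem.List.pyGetD xs i 0)) o
      = pvOmax2 o (ys.foldl (fun c i => pvOmax c (PySem.List.pyGetD xs i 0)) none) := by
  intro ys
  induction ys with
  | nil => intro o; cases o <;> rfl
  | cons y ys ih =>
    intro o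
    simp only [List.foldl_cons]
    have hnone : pvOmax2 none (some (PySem.List.pyGetD xs y 0)) = some (PySem.List.pyGetD xs y 0) := rfl
    rw [ih (pvOmax o (PySem.List.pyGetD xs y 0)), ih (pvOmax none (PySem.List.pyGetD xs y 0)),
      pvOmax_eq o, pvOmax_eq none, hnone, pvOmax2_assoc]

lemma fold_range_max : ∀ (k : Nat) (xs : List Int) (lo hi : Int), (hi - lo).toNat ≤ k →
    0 ≤ lo → hi ≤ (xs.length : Int) →
    (PySem.List.pyRange lo hi 1).foldl (fun c i => pvOmax c (PySem.List.pyGetD xs i 0)) none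
      = lMax ((xs.drop lo.toNat).take (hi - lo).toNat) := by
  intro k
  induction k with
  | zero =>
    intro xs lo hi hk h0 hle
    rw [PySem.List.pyRange_one_eq_nil (by omega)]
    have h1 : (hi - lo).toNat = 0 := by omega
    rw [h1, List.take_zero]
    rfl
  | succ k ih =>
    intro xs lo hi hk h0 hle
    by_cases hba : hi ≤ lo
    · rw [PySem.List.pyRange_one_eq_nil hba]
      have h1 : (hi - lo).toNat = 0 := by omega
      rw [h1, List.take_zero]
      rfl
    · have hlt : lo < hi := by omega
      have hidx : lo.toNat < xs.length := by omega
      rw [PySem.List.pyRange_one_cons hlt]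
      simp only [List.foldl_cons]
      rw [foldl_pvOmaxd_acc xs (PySem.List.pyRange (lo + 1) hi 1)
          (pvOmax none (PySem.List.pyGetD xs lo 0)),
        ih xs (lo + 1) hi (by omega) (by omega) hle]
      have hget : PySem.List.pyGetD xs lo 0 = xs[lo.toNat] :=
        PySem.List.pyGetD_eq_getElem xs 0 h0 (by omega)
      have hone : (hi - lo).toNat = (hi - (lo + 1)).toNat + 1 := by omega
      have hdrop : (lo + 1).toNat = lo.toNat + 1 := by omega
      rw [hdrop, List.drop_eq_getElem_cons hidx, hone, List.take_succ_cons, lMax_cons, hget]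
      rfl

lemma foldA_eq (xs : List Int) (x y : Int)
    (h : y < x ∨ (0 ≤ x ∧ y < (xs.length : Int))) :
    (PySem.List.pyRange x (y + 1) 1).foldl
      (fun c i => pvOmax c (PySem.List.pyGetD xs i 0)) none = lMax (segI xs x (y + 1)) := by
  rcases h with h | ⟨hx, hy⟩
  · rw [PySem.List.pyRange_one_eq_nil (by omega)]
    have hseg : segI xs x (y + 1) = [] := by
      unfold segI
      have h1 : (y + 1 - max x 0).toNat = 0 := by omega
      rw [h1, List.take_zero]
    rw [hseg]
    rfl
  · rw [fold_range_max (y + 1 - x).toNat xs x (y + 1) le_rfl hx (by omega)]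
    unfold segI
    have hm : max x 0 = x := by omega
    rw [hm]

-- loop invariant relating A's list state and B's tree state
def pvInv (a' : List Int) (t? : Option STree) : Prop :=
  (a' = [] ∧ t? = none) ∨ ∃ t, t? = some t ∧ stWF t ∧ toListT t = a'

lemma main_loop : ∀ (b : List (String × Int × Int)) (a' : List Int) (t? : Option STree)
    (ans : List String),
    (∀ q ∈ b, (q.1 = "upd" → 0 ≤ q.2.1 ∧ q.2.1 < (a'.length : Int)) ∧
              (q.1 ≠ "upd" → q.2.2 < q.2.1 ∨ (0 ≤ q.2.1 ∧ q.2.2 < (a'.length : Int)))) →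
    pvInv a' t? →
    (b.foldl stepA (a', ans)).2 = (b.foldl stepB (t?, ans)).2 := by
  intro b
  induction b with
  | nil => intro a' t? ans _ _; rfl
  | cons q rest ih =>
    intro a' t? ans hpre hinv
    have hq := hpre q (List.mem_cons_self ..)
    have hrest := fun p hp => hpre p (List.mem_cons_of_mem q hp)
    rw [List.foldl_cons, List.foldl_cons]
    by_cases hu : q.1 = "upd"
    · have hub : (q.1 == "upd") = true := by simp [hu]
      obtain ⟨hx0, hxlt⟩ := hq.1 hu
      rcases hinv with ⟨ha, ht⟩ | ⟨t, ht, hwf, htl⟩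
      · subst ha; simp at hxlt; omega
      · subst ht
        simp only [stepA, stepB, hub, if_true, Option.map_some]
        obtain ⟨hwf', htl'⟩ := stUpdate_spec t hwf q.2.1 q.2.2 hx0 (by rw [htl]; exact hxlt)
        apply ih
        · intro p hp
          simp only [PySem.List.length_pySetD]
          exact hrest p hp
        · right
          refine ⟨_, rfl, hwf', ?_⟩
          rw [htl', htl, PySem.List.pySetD_of_nonneg a' q.2.2 hx0]
    · have hub : (q.1 == "upd") = false := by simp [hu]
      have hcond := hq.2 hu
      rcases hinv with ⟨ha, ht⟩ | ⟨t, ht, hwf, htl⟩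
      · subst ha; subst ht
        have hxy : q.2.2 < q.2.1 := by
          rcases hcond with h | h
          · exact h
          · simp at h; omega
        simp only [stepA, stepB, hub, Bool.false_eq_true, if_false]
        rw [PySem.List.pyRange_one_eq_nil (by omega)]
        simp only [List.foldl_nil]
        apply ih
        · exact hrest
        · left
          exact ⟨rfl, rfl⟩
      · subst ht
        simp only [stepA, stepB, hub, Bool.false_eq_true, if_false]
        have hXY : (PySem.List.pyRange q.2.1 (q.2.2 + 1) 1).foldl
            (fun c i => pvOmax c (PySem.List.pyGetD a' i 0)) none
              = stQuery t q.2.1 (q.2.2 + 1) := by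
          rw [foldA_eq a' q.2.1 q.2.2 hcond, stQuery_spec t hwf, htl]
        rw [hXY]
        apply ih
        · exact hrest
        · right
          exact ⟨t, rfl, hwf, htl⟩

-- ===== VERDICT (by name: the statement is the Claim_ definition above) =====
theorem solve_spec : Claim_equal_solve := by
  intro n m a b _ hpre
  unfold Spec_solve solve solve_alt
  congr 1
  by_cases ha : a.isEmpty
  · rw [if_pos ha]
    apply main_loop b a none [] hpre
    left
    exact ⟨List.isEmpty_iff.mp ha, rfl⟩
  · rw [if_neg ha]
    have hne : a ≠ [] := by simpa [List.isEmpty_iff] using ha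
    have hlen : 0 < a.length := List.length_pos_of_ne_nil hne
    obtain ⟨hwf, htl⟩ := stBuild_spec ((PySem.List.len a - 0).toNat) a 0 (PySem.List.len a)
      le_rfl le_rfl
      (by simp only [PySem.List.len_eq]; omega)
      (by simp only [PySem.List.len_eq]; omega)
    apply main_loop b a _ [] hpre
    right
    refine ⟨_, rfl, hwf, ?_⟩
    rw [show stBuild a 0 (PySem.List.len a)
        = stBuildF ((PySem.List.len a - 0).toNat) a 0 (PySem.List.len a) from rfl, htl]
    simp [PySem.List.len_eq]
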